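-- pv_equiv track=rewrite | github.com/fcbyk/fcbyk-cli | src/fcbyk/commands/lansend/service.py | get_path_parts
-- ===== SOURCE A (Python) =====
-- from typing import Any, Dict, List, Optional
--
-- def get_path_parts(current_path: str) -> List[Dict[str, str]]:
--     """把相对路径拆成面包屑。
--
--     注意：这里必须统一使用 URL 风格的 "/" 分隔符。
--     在 Windows 上如果用 os.path.join，会生成 "\\"，从而导致前端面包屑拼接/跳转异常。
--     """
--     parts: List[Dict[str, str]] = []
--     if current_path:
--         path_parts = current_path.split("/")
--         current = ""
--         for part in path_parts:
--             if part:
--                 # 强制使用 "/" 作为分隔符，避免 Windows 反斜杠污染 API 返回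
--                 current = f"{current}/{part}" if current else part
--                 parts.append({"name": part, "path": current})
--     return parts
-- ===== SOURCE B (Python) =====
-- from typing import Any, Dict, List, Optional
--
-- def get_path_parts(current_path: str) -> List[Dict[str, str]]:
--     parts = [p for p in current_path.split("/") if p]
--     return [{"name": p, "path": "/".join(parts[:i + 1])} for i, p in enumerate(parts)]
-- ===== Notes on version B (the rewrite author's own statement) =====
-- stated objective: simpler
-- what changed: B filters the split components once, then builds each breadcrumb independently by joining a prefix slice of the filtered list, dropping A's running `current` accumulator and the in-loop emptiness guard.
import Mathlib
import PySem

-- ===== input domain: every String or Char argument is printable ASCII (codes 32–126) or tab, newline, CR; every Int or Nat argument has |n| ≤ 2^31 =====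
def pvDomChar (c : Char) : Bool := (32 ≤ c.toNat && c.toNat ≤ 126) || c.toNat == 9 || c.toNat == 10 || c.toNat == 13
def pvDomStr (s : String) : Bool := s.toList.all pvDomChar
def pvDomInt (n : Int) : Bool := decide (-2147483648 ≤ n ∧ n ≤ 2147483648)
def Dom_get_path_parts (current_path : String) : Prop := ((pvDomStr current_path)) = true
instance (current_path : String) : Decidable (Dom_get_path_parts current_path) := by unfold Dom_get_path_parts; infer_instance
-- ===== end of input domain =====

-- B replaces A's running `current` accumulator with one filter pass plus an independent
-- prefix-slice join per breadcrumb (simpler decomposition, not faster).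

-- ===== PORT A =====
-- The running f-string concatenation `f"{current}/{part}"` is kept as List Char append
-- (exact: Lean's own String append is opaque to the kernel), stored via String.ofList.
def get_path_parts (current_path : String) : List (List (String × String)) :=
  if current_path.toList.isEmpty then [] else
  match PySem.Str.split? current_path "/" with
  | none => []
  | some path_parts =>
    (path_parts.foldl
      (fun (st : List Char × List (List (String × String))) part =>
        if part.toList.isEmpty then st
        else
          ((if st.1.isEmpty then part.toList else st.1 ++ '/' :: part.toList),
           st.2 ++ [[("name", part),
             ("path", String.ofList (if st.1.isEmpty then part.toList else st.1 ++ '/' :: part.toList))]]))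
      ([], [])).2

-- ===== PORT B =====
def get_path_parts_alt (current_path : String) : List (List (String × String)) :=
  match PySem.Str.split? current_path "/" with
  | none => []
  | some raw =>
    let parts := raw.filter (fun p => !p.toList.isEmpty)
    (PySem.List.enumerate parts).map
      (fun ip => [("name", ip.2),
                  ("path", PySem.Str.join "/" (PySem.List.slice parts none (some (ip.1 + 1))))])

-- ===== PRECONDITION & SPEC =====
def Spec_get_path_parts (current_path : String) (out : List (List (String × String))) : Prop := out = get_path_parts_alt current_path
instance (current_path : String) (out : List (List (String × String))) : Decidable (Spec_get_path_parts current_path out) := by unfold Spec_get_path_parts; infer_instance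

-- ===== CLAIM (what is proved, stated in full; the proofs are below) =====
def Claim_equal_get_path_parts : Prop := ∀ (current_path : String), Dom_get_path_parts current_path → Spec_get_path_parts current_path (get_path_parts current_path)

-- ===== LEMMAS AND PROOFS =====

-- canonical recursive form both ports are reduced to
def pvH : List Char → List String → List (List (String × String))
  | _, [] => []
  | cur, p :: rest =>
    if p.toList.isEmpty then pvH cur rest
    else
      [("name", p), ("path", String.ofList (if cur.isEmpty then p.toList else cur ++ '/' :: p.toList))] ::
        pvH (if cur.isEmpty then p.toList else cur ++ '/' :: p.toList) rest

-- A's loop in terms of pvH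
lemma pvA_loop (ps : List String) (cur : List Char) (acc : List (List (String × String))) :
    (ps.foldl
      (fun (st : List Char × List (List (String × String))) part =>
        if part.toList.isEmpty then st
        else
          ((if st.1.isEmpty then part.toList else st.1 ++ '/' :: part.toList),
           st.2 ++ [[("name", part),
             ("path", String.ofList (if st.1.isEmpty then part.toList else st.1 ++ '/' :: part.toList))]]))
      (cur, acc)).2 = acc ++ pvH cur ps := by
  induction ps generalizing cur acc with
  | nil => simp [pvH]
  | cons p rest ih =>
    rw [List.foldl_cons]
    by_cases hp : p.toList.isEmpty = true
    · rw [if_pos hp, ih, pvH, if_pos hp]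
    · rw [if_neg hp, ih, pvH, if_neg hp]
      simp

lemma pvH_filter (ps : List String) (cur : List Char) :
    pvH cur (ps.filter (fun p => !p.toList.isEmpty)) = pvH cur ps := by
  induction ps generalizing cur with
  | nil => rfl
  | cons p rest ih =>
    by_cases hp : p.toList.isEmpty = true
    · rw [List.filter_cons_of_neg (by simp [hp]), pvH, if_pos hp, ih]
    · rw [List.filter_cons_of_pos (by simp [hp]), pvH, if_neg hp, pvH, if_neg hp, ih]

lemma pv_join_append_singleton (sep c : List Char) (xs : List (List Char)) (h : xs ≠ []) :
    PySem.Chars.join sep (xs ++ [c]) = PySem.Chars.join sep xs ++ sep ++ c := by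
  induction xs with
  | nil => exact absurd rfl h
  | cons x xs ih =>
    cases xs with
    | nil => simp [PySem.Chars.join_cons_cons, PySem.Chars.join_singleton]
    | cons y ys =>
      have hih := ih (by simp)
      simp only [List.cons_append] at hih ⊢
      rw [PySem.Chars.join_cons_cons, PySem.Chars.join_cons_cons, hih]
      simp

lemma pv_join_ne_nil (sep : List Char) (xs : List (List Char)) (h : xs ≠ [])
    (hx : ∀ x ∈ xs, x ≠ []) : PySem.Chars.join sep xs ≠ [] := by
  cases xs with
  | nil => exact absurd rfl h
  | cons x xs =>
    cases xs with
    | nil => simpa [PySem.Chars.join_singleton] using hx x (by simp)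
    | cons y ys =>
      rw [PySem.Chars.join_cons_cons]
      have := hx x (by simp)
      simp_all

-- the prefix join that pvH's accumulator equals
lemma pv_join_snoc (pre : List String) (p : String)
    (hpre : ∀ q ∈ pre, q ≠ "") :
    PySem.Chars.join ['/'] ((pre ++ [p]).map String.toList) =
      (if PySem.Chars.join ['/'] (pre.map String.toList) = [] then p.toList
       else PySem.Chars.join ['/'] (pre.map String.toList) ++ '/' :: p.toList) := by
  cases pre with
  | nil => simp [PySem.Chars.join_singleton, PySem.Chars.join_nil]
  | cons q qs =>
    have hne : PySem.Chars.join ['/'] ((q :: qs).map String.toList) ≠ [] := by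
      refine pv_join_ne_nil _ _ (by simp) ?_
      intro x hx
      rcases List.mem_map.mp hx with ⟨s, hs, rfl⟩
      simpa using hpre s hs
    simp only [List.map_append, List.map_cons, List.map_nil] at hne ⊢
    rw [pv_join_append_singleton ['/'] p.toList (q.toList :: List.map String.toList qs) (by simp),
      if_neg hne]
    simp

lemma pvB_eq (fl : List String) (pre : List String)
    (hfl : ∀ p ∈ fl, p ≠ "") (hpre : ∀ p ∈ pre, p ≠ "") :
    (PySem.List.enumerate fl (pre.length : Int)).map
      (fun ip => [("name", ip.2),
                  ("path", PySem.Str.join "/" (PySem.List.slice (pre ++ fl) none (some (ip.1 + 1))))])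
    = pvH (PySem.Chars.join ['/'] (pre.map String.toList)) fl := by
  induction fl generalizing pre with
  | nil => simp [PySem.List.enumerate, pvH]
  | cons p rest ih =>
    have hp : p ≠ "" := hfl p (by simp)
    rw [PySem.List.enumerate_cons, List.map_cons]
    have hsl : PySem.List.slice (pre ++ p :: rest) none (some ((pre.length : Int) + 1))
        = pre ++ [p] := by
      rw [PySem.List.slice_to (pre ++ p :: rest) (b := (pre.length : Int) + 1) (by omega)]
      have h1 : ((pre.length : Int) + 1).toNat = pre.length + 1 := by omega
      rw [h1, List.take_append]
      simp
    have hjoin := pv_join_snoc pre p hpre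
    have hpath : PySem.Str.join "/" (pre ++ [p]) =
        String.ofList (if PySem.Chars.join ['/'] (pre.map String.toList) = []
          then p.toList else PySem.Chars.join ['/'] (pre.map String.toList) ++ '/' :: p.toList) := by
      have ht : (PySem.Str.join "/" (pre ++ [p])).toList =
          (if PySem.Chars.join ['/'] (pre.map String.toList) = []
           then p.toList else PySem.Chars.join ['/'] (pre.map String.toList) ++ '/' :: p.toList) := by
        rw [PySem.Str.toList_join, ← hjoin]
        rfl
      have := congrArg String.ofList ht
      rwa [String.ofList_toList] at this
    have hrest := ih (pre ++ [p]) (fun q hq => hfl q (by simp [hq]))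
      (by intro q hq
          rcases List.mem_append.mp hq with h | h
          · exact hpre q h
          · simp at h; subst h; exact hp)
    simp only [List.length_append, List.length_cons, List.length_nil, Nat.cast_add,
      Nat.cast_one, zero_add, List.append_assoc, List.cons_append,
      List.nil_append] at hrest
    rw [hsl, hpath, hrest, pv_join_snoc pre p hpre]
    simp [pvH, List.isEmpty_iff, hp]

-- ===== VERDICT (by name: the statement is the Claim_ definition above) =====
theorem get_path_parts_spec : Claim_equal_get_path_parts := by
  intro current_path _
  unfold Spec_get_path_parts get_path_parts get_path_parts_alt
  by_cases h : current_path.toList.isEmpty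
  · have he : current_path = "" := by
      have h2 := String.ofList_toList (s := current_path)
      rw [List.isEmpty_iff] at h
      rw [h] at h2
      exact h2.symm
    subst he
    decide
  · rw [if_neg h]
    cases hs : PySem.Str.split? current_path "/" with
    | none => rfl
    | some raw =>
      dsimp only
      rw [pvA_loop, List.nil_append, ← pvH_filter raw]
      have hfl : ∀ p ∈ raw.filter (fun p => !p.toList.isEmpty), p ≠ "" := by
        intro p hp
        have := (List.mem_filter.mp hp).2
        simpa using this
      have hb := pvB_eq (raw.filter (fun p => !p.toList.isEmpty)) [] hfl (by simp)
      simp only [List.length_nil, Nat.cast_zero, List.nil_append, List.map_nil,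
        PySem.Chars.join_nil] at hb
      rw [← hb]
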